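-- pv_equiv track=rewrite | github.com/arpit2804/ScanForge | evaluate_analysis.py | generate_padding
-- ===== SOURCE A (Python) =====
-- def generate_padding(target_length: int = 1000) -> str:
--     """Generates benign HTML padding to reach target length."""
--     lorem = (
--         "Lorem ipsum dolor sit amet, consectetur adipiscing elit. "
--         "Sed do eiusmod tempor incididunt ut labore et dolore magna aliqua. "
--         "Ut enim ad minim veniam, quis nostrud exercitation ullamco laboris "
--         "nisi ut aliquip ex ea commodo consequat. Duis aute irure dolor in "
--         "reprehenderit in voluptate velit esse cillum dolore eu fugiat nulla "
--         "pariatur. Excepteur sint occaecat cupidatat non proident, sunt in "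
--         "culpa qui officia deserunt mollit anim id est laborum. "
--         "<div><span><p>Page footer content and copyright info.</p></span></div>"
--     )
--     while len(lorem) < target_length:
--         lorem += lorem
--     return lorem[:target_length]
-- ===== SOURCE B (Python) =====
-- def generate_padding(target_length: int = 1000) -> str:
--     """Generates benign HTML padding to reach target length."""
--     lorem = (
--         "Lorem ipsum dolor sit amet, consectetur adipiscing elit. "
--         "Sed do eiusmod tempor incididunt ut labore et dolore magna aliqua. "
--         "Ut enim ad minim veniam, quis nostrud exercitation ullamco laboris "
--         "nisi ut aliquip ex ea commodo consequat. Duis aute irure dolor in "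
--         "reprehenderit in voluptate velit esse cillum dolore eu fugiat nulla "
--         "pariatur. Excepteur sint occaecat cupidatat non proident, sunt in "
--         "culpa qui officia deserunt mollit anim id est laborum. "
--         "<div><span><p>Page footer content and copyright info.</p></span></div>"
--     )
--     if target_length <= len(lorem):
--         return lorem[:target_length]
--     return "".join(lorem[i % len(lorem)] for i in range(target_length))
-- ===== Notes on version B (the rewrite author's own statement) =====
-- stated objective: alternative
-- what changed: Replaces A's iterative doubling loop (lorem += lorem then slice) by direct construction: return lorem[:target_length] when it already suffices, else build the string character-by-character with modular indexing lorem[i % len(lorem)] over range(target_length).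
import Mathlib
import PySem

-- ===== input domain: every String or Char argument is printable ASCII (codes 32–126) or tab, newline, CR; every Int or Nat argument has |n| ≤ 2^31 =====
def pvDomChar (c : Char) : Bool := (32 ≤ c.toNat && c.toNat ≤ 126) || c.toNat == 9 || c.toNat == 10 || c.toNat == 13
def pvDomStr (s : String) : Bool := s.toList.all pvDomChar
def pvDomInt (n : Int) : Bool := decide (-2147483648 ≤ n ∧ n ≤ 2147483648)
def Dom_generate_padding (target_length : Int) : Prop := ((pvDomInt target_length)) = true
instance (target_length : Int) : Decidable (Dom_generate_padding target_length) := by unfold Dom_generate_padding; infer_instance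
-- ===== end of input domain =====

set_option maxRecDepth 8192

-- B replaces A's doubling loop by a direct construction: the prefix slice when one lorem copy suffices, otherwise one character per index via modular indexing; alternative decomposition, same observable result.

-- ===== PORT A =====
-- the lorem module constant of A, as the char list of the Python string
def pvLoremA : List Char := String.toList "Lorem ipsum dolor sit amet, consectetur adipiscing elit. Sed do eiusmod tempor incididunt ut labore et dolore magna aliqua. Ut enim ad minim veniam, quis nostrud exercitation ullamco laboris nisi ut aliquip ex ea commodo consequat. Duis aute irure dolor in reprehenderit in voluptate velit esse cillum dolore eu fugiat nulla pariatur. Excepteur sint occaecat cupidatat non proident, sunt in culpa qui officia deserunt mollit anim id est laborum. <div><span><p>Page footer content and copyright info.</p></span></div>"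

lemma pvLoremA_ne : pvLoremA ≠ [] := by
  rw [pvLoremA, ne_eq, String.toList_eq_nil_iff]; simp

-- while len(lorem) < target_length: lorem += lorem
def pvPadLoop (target : Int) (s : List Char) (h : s ≠ []) : List Char :=
  if (s.length : Int) < target then
    pvPadLoop target (s ++ s) (by simp [h])
  else s
termination_by (target - s.length).toNat
decreasing_by
  have hp : 0 < s.length := List.length_pos_iff.mpr h
  simp only [List.length_append]
  omega

def generate_padding (target_length : Int) : String :=
  String.ofList (PySem.List.slice (pvPadLoop target_length pvLoremA pvLoremA_ne) none (some target_length))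

-- ===== PORT B =====
-- B's copy of the lorem constant
def pvLoremB : List Char := String.toList "Lorem ipsum dolor sit amet, consectetur adipiscing elit. Sed do eiusmod tempor incididunt ut labore et dolore magna aliqua. Ut enim ad minim veniam, quis nostrud exercitation ullamco laboris nisi ut aliquip ex ea commodo consequat. Duis aute irure dolor in reprehenderit in voluptate velit esse cillum dolore eu fugiat nulla pariatur. Excepteur sint occaecat cupidatat non proident, sunt in culpa qui officia deserunt mollit anim id est laborum. <div><span><p>Page footer content and copyright info.</p></span></div>"

-- if target_length <= len(lorem): return lorem[:target_length]
-- return "".join(lorem[i % len(lorem)] for i in range(target_length))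
-- lorem[i % n] is ported via pyGetD: the index i % n is always in range (0 ≤ i % n < n), so the default is never used
def generate_padding_alt (target_length : Int) : String :=
  if target_length ≤ PySem.List.len pvLoremB then
    String.ofList (PySem.List.slice pvLoremB none (some target_length))
  else
    String.ofList ((PySem.List.pyRange 0 target_length 1).map
      (fun i => PySem.List.pyGetD pvLoremB (PySem.Int.mod i (PySem.List.len pvLoremB)) ' '))

-- ===== PRECONDITION & SPEC =====
def Spec_generate_padding (target_length : Int) (out : String) : Prop := out = generate_padding_alt target_length
instance (target_length : Int) (out : String) : Decidable (Spec_generate_padding target_length out) := by unfold Spec_generate_padding; infer_instance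

-- ===== CLAIM (what is proved, stated in full; the proofs are below) =====
def Claim_equal_generate_padding : Prop := ∀ (target_length : Int), Dom_generate_padding target_length → Spec_generate_padding target_length (generate_padding target_length)

-- ===== LEMMAS AND PROOFS =====

lemma pvLorem_eq : pvLoremB = pvLoremA := rfl

lemma pvLoremA_pos : 0 < pvLoremA.length := List.length_pos_iff.mpr pvLoremA_ne

-- A's loop produces some number m ≥ 1 of concatenated copies of its seed, of total length ≥ target
lemma pvPadLoop_spec (t : Int) (s : List Char) (h : s ≠ []) :
    ∃ m : Nat, 0 < m ∧ pvPadLoop t s h = (List.replicate m s).flatten ∧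
      t ≤ ((pvPadLoop t s h).length : Int) := by
  fun_induction pvPadLoop t s h with
  | case1 s h hlt ih =>
      obtain ⟨m, hm, heq, hlen⟩ := ih
      refine ⟨2 * m, by omega, ?_, hlen⟩
      rw [heq]
      have key : ∀ k : Nat, (List.replicate k (s ++ s)).flatten = (List.replicate (2 * k) s).flatten := by
        intro k
        induction k with
        | zero => rfl
        | succ k ih2 =>
            have h2 : 2 * (k + 1) = (2 * k) + 1 + 1 := by omega
            rw [h2]
            simp [List.replicate_succ, List.flatten_cons, ih2, List.append_assoc]
      exact key m
  | case2 s h hlt =>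
      exact ⟨1, by omega, by simp, by omega⟩

-- indexing into a concatenation of copies is modular indexing into one copy
lemma pvGetElem?_flatten_replicate (s : List Char) (m i : Nat) (h : i < m * s.length) :
    ((List.replicate m s).flatten)[i]? = s[i % s.length]? := by
  induction m generalizing i with
  | zero => simp at h
  | succ m ih =>
      have hs : 0 < s.length := by
        rcases Nat.eq_zero_or_pos s.length with h0 | h0
        · rw [h0, Nat.mul_zero] at h; omega
        · exact h0
      have h' : i < m * s.length + s.length := by rw [Nat.succ_mul] at h; exact h
      rw [List.replicate_succ, List.flatten_cons, List.getElem?_append]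
      by_cases hi : i < s.length
      · simp [hi, Nat.mod_eq_of_lt hi]
      · rw [if_neg hi, ih (i - s.length) (by omega)]
        conv_rhs => rw [Nat.mod_eq_sub_mod (by omega)]

-- ===== VERDICT (by name: the statement is the Claim_ definition above) =====
theorem generate_padding_spec : Claim_equal_generate_padding := by
  intro t _
  unfold Spec_generate_padding generate_padding generate_padding_alt
  rw [pvLorem_eq]
  simp only [PySem.List.len_eq]
  by_cases hsmall : t ≤ (pvLoremA.length : Int)
  · -- one copy of lorem already suffices on both sides: the loop never runs
    have hloop : pvPadLoop t pvLoremA pvLoremA_ne = pvLoremA := by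
      rw [pvPadLoop, if_neg (not_lt.mpr hsmall)]
    rw [hloop, if_pos hsmall]
  · -- t > len(lorem): A is a long-enough repetition truncated; B builds index-by-index
    rw [if_neg hsmall]
    rw [not_le] at hsmall
    have hn := pvLoremA_pos
    have ht0 : 0 ≤ t := by omega
    obtain ⟨m, hm, heq, hlong⟩ := pvPadLoop_spec t pvLoremA pvLoremA_ne
    rw [heq] at hlong ⊢
    rw [PySem.List.slice_to _ ht0]
    congr 1
    have hflat : ((List.replicate m pvLoremA).flatten).length = m * pvLoremA.length := by
      simp [List.length_flatten, List.sum_replicate, smul_eq_mul]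
    have htm : t.toNat ≤ m * pvLoremA.length := by rw [hflat] at hlong; omega
    have hcast : t = ((t.toNat : Nat) : Int) := by omega
    rw [hcast]
    apply List.ext_getElem?_iff.mpr
    intro i
    simp only [Int.toNat_natCast]
    by_cases hi : i < t.toNat
    · rw [List.getElem?_take_of_lt hi,
          pvGetElem?_flatten_replicate _ m i (by omega),
          PySem.List.getElem?_map_pyRange_zero _ t.toNat i hi,
          PySem.Int.mod_natCast, PySem.List.pyGetD_natCast]
      have hlt : i % pvLoremA.length < pvLoremA.length := Nat.mod_lt _ hn
      rw [List.getD_eq_getElem?_getD, List.getElem?_eq_getElem hlt]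
      rfl
    · rw [List.getElem?_eq_none (by rw [List.length_take]; omega),
          List.getElem?_eq_none (by rw [List.length_map, PySem.List.length_pyRange_one]; omega)]
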